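-- pv_equiv track=rewrite | github.com/marcelblijleven/adventofcode2019 | day_16/day_16.py | part2
-- ===== SOURCE A (Python) =====
-- def part2(data):
--     offset = int(''.join(map(str, data[:7])))
--     data = (data*10000)[offset:]
--     for _ in range(100):
--         suffix_sum = 0
--         for i in range(len(data)-1, -1, -1):
--             data[i] = suffix_sum = (suffix_sum + data[i]) % 10
--     return ''.join(map(str, data[:8]))
-- ===== SOURCE B (Python) =====
-- def part2(data):
--     # One pass over the tail (right to left) with a pipeline of 100 running
--     # accumulators, instead of 100 full passes: s[p] holds the current value of
--     # the (p+1)-times-transformed sequence at the scan position.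
--     offset = int(''.join(map(str, data[:7])))
--     tail = (data * 10000)[offset:]
--     s = [0] * 100
--     out = []
--     pos = len(tail)
--     for d in reversed(tail):
--         pos -= 1
--         acc = d
--         for p in range(100):
--             acc = s[p] = (s[p] + acc) % 10
--         if pos < 8:
--             out.append(acc)
--     out.reverse()
--     return ''.join(map(str, out))
-- ===== Notes on version B (the rewrite author's own statement) =====
-- stated objective: alternative
-- what changed: Loop interchange: instead of A's 100 successive full passes that rewrite the tail list each phase, B makes a single right-to-left pass over the tail carrying a pipeline of 100 running accumulators (s[p] = current value of the (p+1)-times-transformed sequence at the scan position) and collects the first 8 output digits on the fly.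
import Mathlib
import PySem

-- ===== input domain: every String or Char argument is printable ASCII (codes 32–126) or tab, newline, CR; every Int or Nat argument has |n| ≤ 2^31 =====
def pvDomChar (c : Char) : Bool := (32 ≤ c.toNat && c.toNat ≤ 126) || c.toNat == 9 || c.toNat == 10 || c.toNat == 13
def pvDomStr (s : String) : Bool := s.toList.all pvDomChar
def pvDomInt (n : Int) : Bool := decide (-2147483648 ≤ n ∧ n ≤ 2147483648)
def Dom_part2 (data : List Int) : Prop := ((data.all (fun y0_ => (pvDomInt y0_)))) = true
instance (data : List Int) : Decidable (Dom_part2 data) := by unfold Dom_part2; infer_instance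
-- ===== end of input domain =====

-- B replaces A's 100 full passes over the tail by ONE right-to-left pass carrying a
-- pipeline of 100 running accumulators (loop interchange); objective: alternative.

-- ===== PORT A =====
-- A's inner loop 'for i in range(len(data)-1, -1, -1): data[i] = suffix_sum = (suffix_sum + data[i]) % 10'
-- walks the list right to left carrying suffix_sum, rewriting each cell: ported as a fold
-- over the reversed list that rebuilds the list (consing restores left-to-right order).
def pvPhaseA (l : List Int) : List Int :=
  (l.reverse.foldl
    (fun (st : List Int × Int) x =>
      let v := PySem.Int.mod (st.2 + x) 10
      (v :: st.1, v))
    ([], 0)).1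

def part2 (data : List Int) : String :=
  match PySem.Int.ofStr? (PySem.Str.join "" ((PySem.List.slice data none (some 7)).map PySem.Int.toStr)) with
  | none => ""   -- int('') / '…-…' raises ValueError in Python; excluded by Pre_part2
  | some offset =>
    let tail := PySem.List.slice (PySem.List.pyRepeat data 10000) (some offset) none
    let final := (List.range 100).foldl (fun d _ => pvPhaseA d) tail
    PySem.Str.join "" ((PySem.List.slice final none (some 8)).map PySem.Int.toStr)

-- ===== PORT B =====
-- inner loop 'for p in range(100): acc = s[p] = (s[p] + acc) % 10'  (p < 100 = len s, so getD is exact)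
def pvColStep (s : List Int) (d : Int) : List Int × Int :=
  (List.range 100).foldl
    (fun st p =>
      let v := PySem.Int.mod (st.1.getD p 0 + st.2) 10
      (st.1.set p v, v))
    (s, d)

-- body of 'for d in reversed(tail)'; state (s, pos, out)
def pvScanStep (st : List Int × Int × List Int) (d : Int) : List Int × Int × List Int :=
  let pos := st.2.1 - 1
  let (s, acc) := pvColStep st.1 d
  (s, pos, if pos < 8 then st.2.2 ++ [acc] else st.2.2)

def part2_alt (data : List Int) : String :=
  match PySem.Int.ofStr? (PySem.Str.join "" ((PySem.List.slice data none (some 7)).map PySem.Int.toStr)) with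
  | none => ""
  | some offset =>
    let tail := PySem.List.slice (PySem.List.pyRepeat data 10000) (some offset) none
    let res := tail.reverse.foldl pvScanStep (List.replicate 100 0, (tail.length : Int), [])
    PySem.Str.join "" (res.2.2.reverse.map PySem.Int.toStr)

-- ===== PRECONDITION & SPEC =====
-- Pre_ excludes exactly the inputs on which A raises ValueError in
-- int(''.join(map(str, data[:7]))): the empty list ('' is not an int) and a negative
-- element at positions 1..6, whose '-' lands in the middle of the concatenation.
def Pre_part2 (data : List Int) : Prop := data ≠ [] ∧ ∀ x ∈ (data.drop 1).take 6, 0 ≤ x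
instance (data : List Int) : Decidable (Pre_part2 data) := by unfold Pre_part2; infer_instance

def pvWitness_part2 : List Int := [1, 0]

def Spec_part2 (data : List Int) (out : String) : Prop := out = part2_alt data
instance (data : List Int) (out : String) : Decidable (Spec_part2 data out) := by unfold Spec_part2; infer_instance

-- ===== CLAIM (what is proved, stated in full; the proofs are below) =====
def Claim_equal_part2 : Prop := ∀ (data : List Int), Dom_part2 data → Pre_part2 data → Spec_part2 data (part2 data)

-- ===== LEMMAS AND PROOFS =====

theorem pvPhaseA_fold (l : List Int) :
    l.reverse.foldl
      (fun (st : List Int × Int) x =>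
        let v := PySem.Int.mod (st.2 + x) 10
        (v :: st.1, v))
      ([], 0)
    = (pvPhaseA l, (pvPhaseA l).headD 0) := by
  induction l with
  | nil => rfl
  | cons x xs ih =>
    have hx : pvPhaseA (x :: xs)
        = ((x :: xs).reverse.foldl
            (fun (st : List Int × Int) x =>
              let v := PySem.Int.mod (st.2 + x) 10
              (v :: st.1, v))
            ([], 0)).1 := rfl
    rw [List.reverse_cons, List.foldl_append] at hx ⊢
    rw [ih] at hx ⊢
    simp only [List.foldl_cons, List.foldl_nil] at hx ⊢
    rw [hx]
    rfl

theorem pvPhaseA_cons (x : Int) (xs : List Int) :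
    pvPhaseA (x :: xs) = PySem.Int.mod ((pvPhaseA xs).headD 0 + x) 10 :: pvPhaseA xs := by
  have hx : pvPhaseA (x :: xs)
      = ((x :: xs).reverse.foldl
          (fun (st : List Int × Int) x =>
            let v := PySem.Int.mod (st.2 + x) 10
            (v :: st.1, v))
          ([], 0)).1 := rfl
  rw [List.reverse_cons, List.foldl_append, pvPhaseA_fold] at hx
  exact hx

-- the tail after m of A's phases
def pvPhases (m : Nat) (l : List Int) : List Int := (List.range m).foldl (fun d _ => pvPhaseA d) l

-- B's accumulator vector after the scan has consumed the suffix l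
def pvCol (l : List Int) : List Int := (List.range 100).map (fun p => (pvPhases (p + 1) l).headD 0)

theorem pvPhases_succ (m : Nat) (l : List Int) : pvPhases (m + 1) l = pvPhaseA (pvPhases m l) := by
  simp [pvPhases, List.range_succ]

theorem pvPhases_succ' (m : Nat) (l : List Int) : pvPhases (m + 1) l = pvPhases m (pvPhaseA l) := by
  induction m generalizing l with
  | zero => simp [pvPhases]
  | succ k ih => rw [pvPhases_succ (k + 1), ih, ← pvPhases_succ]

theorem pvPhases_nil (m : Nat) : pvPhases m [] = [] := by
  induction m with
  | zero => simp [pvPhases]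
  | succ k ih => rw [pvPhases_succ, ih]; rfl

theorem pvPhases_cons (m : Nat) (x : Int) (xs : List Int) :
    pvPhases m (x :: xs) = (pvPhases m (x :: xs)).headD 0 :: pvPhases m xs := by
  induction m generalizing x xs with
  | zero => simp [pvPhases]
  | succ k ih =>
    rw [pvPhases_succ' k, pvPhaseA_cons, ih, ← pvPhases_succ']
    rfl

theorem pvPhases_head_rec (m : Nat) (x : Int) (xs : List Int) :
    (pvPhases (m + 1) (x :: xs)).headD 0 =
      PySem.Int.mod ((pvPhases (m + 1) xs).headD 0 + (pvPhases m (x :: xs)).headD 0) 10 := by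
  conv_lhs => rw [pvPhases_succ, pvPhases_cons m x xs]
  show (pvPhaseA (_ :: _)).headD 0 = _
  rw [pvPhaseA_cons, ← pvPhases_succ]
  rfl

theorem pvCol_nil : pvCol [] = List.replicate 100 0 := by
  apply List.ext_getElem
  · simp [pvCol]
  · intro i h1 h2
    simp only [pvCol, List.getElem_map, List.getElem_replicate, pvPhases_nil]
    rfl

theorem set_map_range {n k : Nat} (f : Nat → Int) (v : Int) (hk : k < n) :
    ((List.range n).map f).set k v = (List.range n).map (fun p => if p = k then v else f p) := by
  apply List.ext_getElem
  · simp
  · intro i h1 h2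
    simp only [List.getElem_set, List.getElem_map, List.getElem_range]
    by_cases h : i = k
    · subst h; rfl
    · rw [if_neg (Ne.symm h), if_neg h]

theorem pvColStep_partial (x : Int) (xs : List Int) (k : Nat) (hk : k ≤ 100) :
    (List.range k).foldl
      (fun st p =>
        let v := PySem.Int.mod (st.1.getD p 0 + st.2) 10
        (st.1.set p v, v))
      (pvCol xs, x)
    = ((List.range 100).map (fun p => (pvPhases (p + 1) (if p < k then x :: xs else xs)).headD 0),
       (pvPhases k (x :: xs)).headD 0) := by
  induction k with
  | zero =>
    simp only [List.range_zero, List.foldl_nil, Prod.mk.injEq]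
    refine ⟨?_, rfl⟩
    simp only [pvCol]
    apply List.map_congr_left
    intro p _
    rw [if_neg (Nat.not_lt_zero p)]
  | succ j ih =>
    rw [List.range_succ, List.foldl_append, ih (by omega)]
    simp only [List.foldl_cons, List.foldl_nil]
    have hj : j < 100 := by omega
    rw [PySem.List.getD_map_range _ _ _ _ hj, set_map_range _ _ hj]
    simp only [show ¬ j < j from by omega, if_false]
    rw [Prod.mk.injEq]
    refine ⟨?_, ?_⟩
    · apply List.map_congr_left
      intro p hp
      by_cases hpj : p = j
      · subst hpj
        simp only [show p < p + 1 from by omega, if_pos]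
        rw [pvPhases_head_rec]
      · rcases Nat.lt_or_ge p j with h | h
        · simp [hpj, show p < j from h, show p < j + 1 from by omega]
        · simp [hpj, show ¬ p < j from by omega, show ¬ p < j + 1 from by omega]
    · rw [pvPhases_head_rec]

theorem pvColStep_col (x : Int) (xs : List Int) :
    pvColStep (pvCol xs) x = (pvCol (x :: xs), (pvPhases 100 (x :: xs)).headD 0) := by
  rw [pvColStep, pvColStep_partial x xs 100 le_rfl, Prod.mk.injEq]
  refine ⟨?_, rfl⟩
  apply List.map_congr_left
  intro p hp
  rw [if_pos (List.mem_range.mp hp)]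

theorem pvScan_main (l : List Int) (c : Nat) (o : List Int) :
    l.reverse.foldl pvScanStep (pvCol [], ((l.length + c : Nat) : Int), o)
    = (pvCol l, (c : Int), o ++ ((pvPhases 100 l).take (8 - c)).reverse) := by
  induction l generalizing c o with
  | nil => simp [pvPhases_nil]
  | cons x xs ih =>
    rw [List.reverse_cons, List.foldl_append]
    have hcast : (((x :: xs).length + c : Nat) : Int) = ((xs.length + (c + 1) : Nat) : Int) := by
      simp; omega
    rw [hcast, ih (c + 1) o]
    simp only [List.foldl_cons, List.foldl_nil, pvScanStep, pvColStep_col]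
    have hpos : ((c + 1 : Nat) : Int) - 1 = (c : Int) := by push_cast; ring
    rw [hpos]
    refine Prod.ext rfl (Prod.ext rfl ?_)
    simp only []
    by_cases hc : c < 8
    · rw [if_pos (by exact_mod_cast hc)]
      rw [pvPhases_cons 100 x xs]
      rw [show 8 - c = (8 - (c + 1)) + 1 from by omega, List.take_succ_cons, List.reverse_cons]
      rw [← List.append_assoc]
      simp only [List.headD_cons]
    · rw [if_neg (by omega)]
      rw [show 8 - c = 0 from by omega, show 8 - (c + 1) = 0 from by omega]
      simp

-- ===== VERDICT (by name: the statement is the Claim_ definition above) =====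
theorem part2_spec : Claim_equal_part2 := by
  intro data _ _
  unfold Spec_part2 part2 part2_alt
  cases PySem.Int.ofStr? (PySem.Str.join "" ((PySem.List.slice data none (some 7)).map PySem.Int.toStr)) with
  | none => rfl
  | some offset =>
    simp only []
    set tail := PySem.List.slice (PySem.List.pyRepeat data 10000) (some offset) none with htail
    have hrun := pvScan_main tail 0 []
    rw [pvCol_nil] at hrun
    simp only [Nat.add_zero, Nat.cast_zero] at hrun
    rw [hrun]
    simp only [List.nil_append, List.reverse_reverse, Nat.sub_zero]
    have hs := PySem.List.slice_to ((List.range 100).foldl (fun d _ => pvPhaseA d) tail) (b := 8) (by norm_num)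
    rw [hs]
    rfl
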